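-- pv_equiv track=rewrite | github.com/WinningCloud/PDF-to-Quiz-generator | PDF to Quiz Generator/pdf-quiz-platform/backend/agents/formatter_agent.py | _sort_questions
-- ===== SOURCE A (Python) =====
-- from typing import Dict, List, Any, Tuple
--
-- def _sort_questions(questions: List[Dict]) -> List[Dict]:
--     """Sort questions by topic and difficulty"""
--     # First, sort by topic
--     questions_by_topic = {}
--     for question in questions:
--         topic = question.get("normalized_topic", "General")
--         if topic not in questions_by_topic:
--             questions_by_topic[topic] = []
--         questions_by_topic[topic].append(question)
--
--     # Sort topics alphabetically
--     sorted_topics = sorted(questions_by_topic.keys())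
--
--     # Within each topic, sort by difficulty (easy -> medium -> hard)
--     sorted_questions = []
--     for topic in sorted_topics:
--         topic_questions = questions_by_topic[topic]
--         # Define difficulty order
--         difficulty_order = {"easy": 1, "medium": 2, "hard": 3}
--         topic_questions.sort(
--             key=lambda q: difficulty_order.get(q.get("difficulty", "medium"), 2)
--         )
--         sorted_questions.extend(topic_questions)
--
--     return sorted_questions
-- ===== SOURCE B (Python) =====
-- def _sort_questions(questions):
--     """Sort questions by topic then difficulty with one stable composite-key sort."""
--     difficulty_order = {"easy": 1, "medium": 2, "hard": 3}
--     return sorted(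
--         questions,
--         key=lambda q: (
--             q.get("normalized_topic", "General"),
--             difficulty_order.get(q.get("difficulty", "medium"), 2),
--         ),
--     )
-- ===== Notes on version B (the rewrite author's own statement) =====
-- stated objective: simpler
-- what changed: Replaces the group-by-topic dict, per-topic in-place difficulty sorts and concatenation with a single stable sort on the composite key (topic, difficulty rank).
import Mathlib
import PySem

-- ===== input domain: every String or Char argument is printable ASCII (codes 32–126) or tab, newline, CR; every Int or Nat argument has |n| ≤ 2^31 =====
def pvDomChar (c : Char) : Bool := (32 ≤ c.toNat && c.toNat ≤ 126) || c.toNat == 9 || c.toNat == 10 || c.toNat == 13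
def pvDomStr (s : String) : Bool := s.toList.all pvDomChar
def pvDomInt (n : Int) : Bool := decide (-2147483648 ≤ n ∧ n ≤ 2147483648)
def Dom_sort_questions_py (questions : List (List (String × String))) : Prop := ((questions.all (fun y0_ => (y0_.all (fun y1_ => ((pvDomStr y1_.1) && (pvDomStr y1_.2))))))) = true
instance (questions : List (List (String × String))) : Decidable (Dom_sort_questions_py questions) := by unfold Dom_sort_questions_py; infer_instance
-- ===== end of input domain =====

-- B replaces A's group-by-topic dict + per-topic sorts + concatenation with ONE stable
-- composite-key sort; same return value (A does not mutate its argument).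

-- shared translations of the two key expressions both Pythons evaluate per question:
-- q.get("normalized_topic", "General")
def pvTopic (q : List (String × String)) : String :=
  PySem.Dict.getD (PySem.Dict.mk q) "normalized_topic" "General"

-- difficulty_order.get(q.get("difficulty", "medium"), 2)
def pvRank (q : List (String × String)) : Int :=
  PySem.Dict.getD (PySem.Dict.ofList [("easy", (1 : Int)), ("medium", 2), ("hard", 3)])
    (PySem.Dict.getD (PySem.Dict.mk q) "difficulty" "medium") 2

-- ===== PORT A =====
def sort_questions_py (questions : List (List (String × String))) : List (List (String × String)) :=
  -- questions_by_topic = {} ; the for-loop over questions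
  let questions_by_topic : PySem.Dict String (List (List (String × String))) :=
    questions.foldl (fun d question =>
      let topic := pvTopic question
      let d := if d.contains topic then d else d.insert topic []
      d.insert topic (d.getD topic [] ++ [question])) PySem.Dict.empty
  -- sorted_topics = sorted(questions_by_topic.keys())
  let sorted_topics := PySem.List.sorted questions_by_topic.keys (fun k => k) false
  -- the second for-loop: per-topic difficulty sort, then extend
  sorted_topics.foldl (fun sorted_questions topic =>
    let topic_questions := questions_by_topic.getD topic []
    sorted_questions ++ PySem.List.sorted topic_questions (fun q => pvRank q) false) []

-- ===== PORT B =====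
def sort_questions_py_alt (questions : List (List (String × String))) : List (List (String × String)) :=
  -- sorted(questions, key=lambda q: (topic(q), rank(q)))
  PySem.List.sorted2 questions (fun q => pvTopic q) (fun q => pvRank q) false

-- ===== PRECONDITION & SPEC =====
def Spec_sort_questions_py (questions : List (List (String × String))) (out : List (List (String × String))) : Prop := out = sort_questions_py_alt questions
instance (questions : List (List (String × String))) (out : List (List (String × String))) : Decidable (Spec_sort_questions_py questions out) := by unfold Spec_sort_questions_py; infer_instance

-- ===== CLAIM (what is proved, stated in full; the proofs are below) =====
def Claim_equal_sort_questions_py : Prop := ∀ (questions : List (List (String × String))), Dom_sort_questions_py questions → Spec_sort_questions_py questions (sort_questions_py questions)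

-- ===== LEMMAS AND PROOFS =====

-- The canonical decomposition both ports are reduced to: topics sorted alphabetically,
-- each followed by its block = that topic's questions, difficulty-sorted (stably).
def pvBef {α : Type} (k1 : α → String) (k2 : α → Int) (a b : α) : Bool :=
  decide (k1 a < k1 b) || (!decide (k1 b < k1 a) && decide (k2 a < k2 b))

def pvBlock {α : Type} (k1 : α → String) (k2 : α → Int) (xs : List α) (t : String) : List α :=
  PySem.List.sorted (xs.filter (fun q => k1 q == t)) k2 false

def pvTopics {α : Type} (k1 : α → String) (xs : List α) : List String :=
  PySem.List.sorted (PySem.List.dedup (xs.map k1)) (fun t => t) false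

def pvCanon {α : Type} (k1 : α → String) (k2 : α → Int) (xs : List α) : List α :=
  (pvTopics k1 xs).flatMap (pvBlock k1 k2 xs)

theorem step_eq (d : PySem.Dict String (List (List (String × String)))) (q : List (String × String)) :
    (let topic := pvTopic q
     let d := if d.contains topic then d else d.insert topic []
     d.insert topic (d.getD topic [] ++ [q])) = d.modify (pvTopic q) [] (· ++ [q]) := by
  by_cases h : d.contains (pvTopic q) = true
  · simp [h, PySem.Dict.modify]
  · simp only [h, if_neg, Bool.not_eq_true, PySem.Dict.modify]
    rw [PySem.Dict.getD_insert_self, PySem.Dict.insert_insert_self,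
        PySem.Dict.getD_of_not_contains d _ (by simp [h])]

theorem portA_canon (xs : List (List (String × String))) :
    sort_questions_py xs = pvCanon pvTopic pvRank xs := by
  unfold sort_questions_py
  have hstep : (fun (d : PySem.Dict String (List (List (String × String)))) question =>
      let topic := pvTopic question
      let d := if d.contains topic then d else d.insert topic []
      d.insert topic (d.getD topic [] ++ [question]))
      = (fun d q => d.modify (pvTopic q) [] (· ++ [q])) := by
    funext d q; exact step_eq d q
  rw [hstep]
  have hfold : xs.foldl (fun d q => d.modify (pvTopic q) [] (· ++ [q])) PySem.Dict.empty
      = (xs.map (fun q => (pvTopic q, q))).foldl (fun d p => d.modify p.1 [] (· ++ [p.2])) PySem.Dict.empty := by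
    rw [List.foldl_map]
  rw [hfold]
  have hgetD : ∀ t, ((xs.map (fun q => (pvTopic q, q))).foldl
      (fun d p => d.modify p.1 [] (· ++ [p.2])) PySem.Dict.empty).getD t []
      = xs.filter (fun q => pvTopic q == t) := by
    intro t
    rw [PySem.Dict.getD_foldl_modify_append]
    simp [List.filter_map, Function.comp_def]
  have hkeys : ((xs.map (fun q => (pvTopic q, q))).foldl
      (fun d p => d.modify p.1 [] (· ++ [p.2])) PySem.Dict.empty).keys
      = PySem.List.dedup (xs.map pvTopic) := by
    rw [show (fun (d : PySem.Dict String (List (List (String × String)))) (p : String × List (String × String)) => d.modify p.1 [] (· ++ [p.2]))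
        = (fun d p => d.modify ((fun (p : String × List (String × String)) => p.1) p) []
            ((fun (_ : PySem.Dict String (List (List (String × String)))) (_ : String × List (String × String)) (v : List (List (String × String))) => v ++ [p.2]) d p)) from rfl]
    rw [PySem.Dict.keys_foldl_modify_key]
    simp [PySem.Set.update, PySem.Dict.keys_empty, List.map_map, Function.comp_def,
      ← PySem.Set.ofList_eq_foldl]
  simp only [hgetD, hkeys]
  rw [PySem.List.foldl_append_eq_flatMap]
  simp [pvCanon, pvTopics]
  rfl


theorem insertBy_cons {α : Type} (bef : α → α → Bool) (x y : α) (t : List α) :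
    PySem.List.insertBy bef x (y :: t) =
      if bef x y then x :: y :: t else y :: PySem.List.insertBy bef x t := by
  rfl

theorem insertBy_congr_mem' {α : Type} (b1 b2 : α → α → Bool) (x : α) (ys : List α)
    (h : ∀ y ∈ ys, b1 x y = b2 x y) :
    PySem.List.insertBy b1 x ys = PySem.List.insertBy b2 x ys := by
  induction ys with
  | nil => rfl
  | cons y t ih =>
    rw [insertBy_cons, insertBy_cons, h y (by simp), ih (fun z hz => h z (by simp [hz]))]

theorem insertBy_append_right' {α : Type} (bef : α → α → Bool) (x : α) (l r : List α)
    (h : ∀ y ∈ l, bef x y = false) :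
    PySem.List.insertBy bef x (l ++ r) = l ++ PySem.List.insertBy bef x r := by
  induction l with
  | nil => simp
  | cons y t ih =>
    rw [List.cons_append, insertBy_cons, h y (by simp), ih (fun z hz => h z (by simp [hz]))]
    simp

theorem insertBy_append_left' {α : Type} (bef : α → α → Bool) (x : α) (l r : List α)
    (h : ∀ y ∈ r, bef x y = true) :
    PySem.List.insertBy bef x (l ++ r) = PySem.List.insertBy bef x l ++ r := by
  induction l with
  | nil =>
    cases r with
    | nil => simp
    | cons y t => simp [PySem.List.insertBy, insertBy_cons, h y (by simp)]
  | cons y t ih =>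
    rw [List.cons_append, insertBy_cons, insertBy_cons]
    by_cases hb : bef x y = true
    · simp [hb]
    · simp only [Bool.not_eq_true] at hb
      simp [hb, ih]

theorem insertBy_split' {α : Type} (bef : α → α → Bool) (x : α) (ys : List α) :
    ∃ l r, ys = l ++ r ∧ PySem.List.insertBy bef x ys = l ++ x :: r ∧
      (∀ y ∈ l, bef x y = false) ∧ (∀ z ∈ r.head?, bef x z = true) := by
  induction ys with
  | nil => exact ⟨[], [], by simp, rfl, by simp, by simp⟩
  | cons y t ih =>
    by_cases hb : bef x y = true
    · exact ⟨[], y :: t, rfl, by rw [insertBy_cons]; simp [hb], by simp, by simp [hb]⟩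
    · simp only [Bool.not_eq_true] at hb
      obtain ⟨l, r, h1, h2, h3, h4⟩ := ih
      refine ⟨y :: l, r, by simp [h1], ?_, ?_, h4⟩
      · rw [insertBy_cons, hb]; simp [h2]
      · intro z hz
        rcases List.mem_cons.1 hz with hz | hz
        · subst hz; exact hb
        · exact h3 z hz

theorem dedup_append_singleton' {α : Type} [BEq α] [LawfulBEq α] (l : List α) (a : α) :
    PySem.List.dedup (l ++ [a]) =
      if a ∈ l then PySem.List.dedup l else PySem.List.dedup l ++ [a] := by
  have h1 : PySem.List.dedup (l ++ [a]) = PySem.Set.add (PySem.List.dedup l) a := by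
    simp only [PySem.List.dedup_eq_ofList, PySem.Set.ofList_eq_foldl, List.foldl_append,
      List.foldl_cons, List.foldl_nil]
  rw [h1]
  unfold PySem.Set.add
  by_cases h : a ∈ l
  · have : PySem.Set.contains (PySem.List.dedup l) a = true := by
      simp only [PySem.Set.contains, List.contains_iff_mem]
      exact (PySem.List.mem_dedup l a).2 h
    rw [this]
    simp [h]
  · have : PySem.Set.contains (PySem.List.dedup l) a = false := by
      simp only [PySem.Set.contains]
      rw [Bool.eq_false_iff]
      intro hc
      exact h ((PySem.List.mem_dedup l a).1 (List.contains_iff_mem.1 hc))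
    rw [this]
    simp [h]

theorem sorted_append_singleton' {α κ : Type} [LT κ] [DecidableLT κ] (xs : List α) (x : α) (key : α → κ) :
    PySem.List.sorted (xs ++ [x]) key false =
      PySem.List.insertBy (fun a b => decide (key a < key b)) x (PySem.List.sorted xs key false) := by
  simp [PySem.List.sorted, List.foldl_append]

theorem sorted2_append_singleton' {α : Type} (k1 : α → String) (k2 : α → Int) (xs : List α) (x : α) :
    PySem.List.sorted2 (xs ++ [x]) k1 k2 false =
      PySem.List.insertBy (pvBef k1 k2) x (PySem.List.sorted2 xs k1 k2 false) := by
  simp only [PySem.List.sorted2, List.foldl_append, List.foldl_cons, List.foldl_nil]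
  refine insertBy_congr_mem' _ _ x _ (fun y _ => ?_)
  simp [pvBef]

theorem flatMap_congr_mem {α β : Type} (l : List α) (f g : α → List β)
    (h : ∀ a ∈ l, f a = g a) : l.flatMap f = l.flatMap g := by
  induction l with
  | nil => rfl
  | cons a t ih => simp [List.flatMap_cons, h a (by simp), ih (fun b hb => h b (by simp [hb]))]

theorem mem_block_topic {α : Type} (k1 : α → String) (k2 : α → Int) (xs : List α) (t : String)
    (y : α) (hy : y ∈ pvBlock k1 k2 xs t) : k1 y = t := by
  unfold pvBlock at hy
  rw [PySem.List.mem_sorted] at hy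
  have := (List.mem_filter.1 hy).2
  exact beq_iff_eq.1 this

theorem topics_pairwise {α : Type} (k1 : α → String) (xs : List α) :
    (pvTopics k1 xs).Pairwise (· < ·) := by
  unfold pvTopics
  simp only [PySem.List.dedup_eq_ofList]
  exact PySem.List.sorted_ofList_pairwise_lt (xs.map k1)

theorem mem_topics {α : Type} (k1 : α → String) (xs : List α) (t : String) :
    t ∈ pvTopics k1 xs ↔ t ∈ xs.map k1 := by
  unfold pvTopics
  rw [PySem.List.mem_sorted, PySem.List.mem_dedup]

theorem block_append_ne {α : Type} (k1 : α → String) (k2 : α → Int) (xs : List α) (x : α)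
    (t : String) (h : t ≠ k1 x) : pvBlock k1 k2 (xs ++ [x]) t = pvBlock k1 k2 xs t := by
  unfold pvBlock
  rw [List.filter_append]
  have : (List.filter (fun q => k1 q == t) [x]) = [] := by
    simp [beq_iff_eq]; exact fun hc => h hc.symm
  rw [this, List.append_nil]

theorem block_append_self {α : Type} (k1 : α → String) (k2 : α → Int) (xs : List α) (x : α) :
    pvBlock k1 k2 (xs ++ [x]) (k1 x) =
      PySem.List.insertBy (fun a b => decide (k2 a < k2 b)) x (pvBlock k1 k2 xs (k1 x)) := by
  unfold pvBlock
  rw [List.filter_append]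
  have : (List.filter (fun q => k1 q == (k1 x)) [x]) = [x] := by simp
  rw [this, sorted_append_singleton']

theorem sorted2_canon {α : Type} (k1 : α → String) (k2 : α → Int) (xs : List α) :
    PySem.List.sorted2 xs k1 k2 false = pvCanon k1 k2 xs := by
  induction xs using List.reverseRecOn with
  | nil => rfl
  | append_singleton xs x ih =>
    rw [sorted2_append_singleton', ih]
    by_cases hmem : k1 x ∈ xs.map k1
    · -- topic already present
      obtain ⟨l, r, hts⟩ := List.append_of_mem ((mem_topics k1 xs (k1 x)).2 hmem)
      have hpw := topics_pairwise k1 xs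
      rw [hts] at hpw
      have hl : ∀ t ∈ l, t < k1 x := by
        intro t ht
        exact (List.pairwise_append.1 hpw).2.2 t ht (k1 x) (by simp)
      have hr : ∀ t ∈ r, k1 x < t := by
        intro t ht
        exact (List.pairwise_cons.1 (List.pairwise_append.1 hpw).2.1).1 t ht
      -- new topics list equals old
      have htopics : pvTopics k1 (xs ++ [x]) = pvTopics k1 xs := by
        unfold pvTopics
        rw [List.map_append, List.map_cons, List.map_nil, dedup_append_singleton', if_pos hmem]
      unfold pvCanon
      rw [htopics, hts, List.flatMap_append, List.flatMap_cons, List.flatMap_append,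
          List.flatMap_cons]
      have hconl : l.flatMap (pvBlock k1 k2 (xs ++ [x])) = l.flatMap (pvBlock k1 k2 xs) := by
        refine flatMap_congr_mem _ _ _ (fun t ht => ?_)
        exact block_append_ne k1 k2 xs x t (ne_of_lt (hl t ht))
      have hconr : r.flatMap (pvBlock k1 k2 (xs ++ [x])) = r.flatMap (pvBlock k1 k2 xs) := by
        refine flatMap_congr_mem _ _ _ (fun t ht => ?_)
        exact block_append_ne k1 k2 xs x t (ne_of_gt (hr t ht))
      rw [hconl, hconr, block_append_self]
      -- now manipulate the insertBy on the left
      rw [insertBy_append_right' (pvBef k1 k2) x _ _ (by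
        intro y hy
        obtain ⟨t, ht, hyt⟩ := List.mem_flatMap.1 hy
        have hk : k1 y = t := mem_block_topic k1 k2 xs t y hyt
        have h1 : k1 y < k1 x := hk ▸ hl t ht
        simp [pvBef, h1, asymm h1])]
      congr 1
      rw [insertBy_append_left' (pvBef k1 k2) x _ _ (by
        intro y hy
        obtain ⟨t, ht, hyt⟩ := List.mem_flatMap.1 hy
        have hk : k1 y = t := mem_block_topic k1 k2 xs t y hyt
        have h1 : k1 x < k1 y := hk ▸ hr t ht
        simp [pvBef, h1])]
      congr 1
      refine insertBy_congr_mem' _ _ x _ (fun y hy => ?_)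
      have hk : k1 y = k1 x := mem_block_topic k1 k2 xs (k1 x) y hy
      simp [pvBef, hk]
    · -- fresh topic
      obtain ⟨l, r, h1, h2, h3, h4⟩ :=
        insertBy_split' (fun a b => decide (a < b)) (k1 x) (pvTopics k1 xs)
      have hpw := topics_pairwise k1 xs
      rw [h1] at hpw
      have hl : ∀ t ∈ l, t < k1 x := by
        intro t ht
        have hne : t ≠ k1 x := by
          intro he
          apply hmem
          have : t ∈ pvTopics k1 xs := h1 ▸ List.mem_append_left r ht
          exact he ▸ (mem_topics k1 xs t).1 this
        have : ¬ (k1 x < t) := by simpa using h3 t ht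
        exact lt_of_le_of_ne (le_of_not_gt this) hne
      have hr : ∀ t ∈ r, k1 x < t := by
        intro t ht
        cases r with
        | nil => simp at ht
        | cons y t' =>
          have hy : k1 x < y := by simpa using h4 y (by simp)
          rcases List.mem_cons.1 ht with he | he
          · exact he ▸ hy
          · exact lt_trans hy ((List.pairwise_cons.1 (List.pairwise_append.1 hpw).2.1).1 t he)
      have htopics : pvTopics k1 (xs ++ [x]) = l ++ k1 x :: r := by
        unfold pvTopics
        rw [List.map_append, List.map_cons, List.map_nil, dedup_append_singleton', if_neg hmem,
            sorted_append_singleton']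
        rw [← h2]
        rfl
      unfold pvCanon
      rw [htopics, h1, List.flatMap_append, List.flatMap_append, List.flatMap_cons]
      have hconl : l.flatMap (pvBlock k1 k2 (xs ++ [x])) = l.flatMap (pvBlock k1 k2 xs) := by
        refine flatMap_congr_mem _ _ _ (fun t ht => ?_)
        exact block_append_ne k1 k2 xs x t (ne_of_lt (hl t ht))
      have hconr : r.flatMap (pvBlock k1 k2 (xs ++ [x])) = r.flatMap (pvBlock k1 k2 xs) := by
        refine flatMap_congr_mem _ _ _ (fun t ht => ?_)
        exact block_append_ne k1 k2 xs x t (ne_of_gt (hr t ht))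
      have hblk : pvBlock k1 k2 (xs ++ [x]) (k1 x) = [x] := by
        unfold pvBlock
        rw [List.filter_append]
        have hnil : List.filter (fun q => k1 q == k1 x) xs = [] := by
          rw [List.filter_eq_nil_iff]
          intro q hq
          simp only [beq_iff_eq]
          intro he
          exact hmem (he ▸ List.mem_map_of_mem hq)
        rw [hnil, List.nil_append]
        have hone : List.filter (fun q => k1 q == k1 x) [x] = [x] := by simp
        rw [hone]
        rfl
      rw [hconl, hconr, hblk]
      rw [insertBy_append_right' (pvBef k1 k2) x _ _ (by
        intro y hy
        obtain ⟨t, ht, hyt⟩ := List.mem_flatMap.1 hy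
        have hk : k1 y = t := mem_block_topic k1 k2 xs t y hyt
        have hlt : k1 y < k1 x := hk ▸ hl t ht
        simp [pvBef, hlt, asymm hlt])]
      congr 1
      have : PySem.List.insertBy (pvBef k1 k2) x (r.flatMap (pvBlock k1 k2 xs)) =
          PySem.List.insertBy (pvBef k1 k2) x [] ++ r.flatMap (pvBlock k1 k2 xs) := by
        rw [← insertBy_append_left' (pvBef k1 k2) x [] _ (by
          intro y hy
          obtain ⟨t, ht, hyt⟩ := List.mem_flatMap.1 hy
          have hk : k1 y = t := mem_block_topic k1 k2 xs t y hyt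
          have hlt : k1 x < k1 y := hk ▸ hr t ht
          simp [pvBef, hlt])]
        simp
      rw [this]
      rfl

-- ===== VERDICT (by name: the statement is the Claim_ definition above) =====
theorem sort_questions_py_spec : Claim_equal_sort_questions_py := by
  intro questions _
  unfold Spec_sort_questions_py sort_questions_py_alt
  rw [portA_canon, sorted2_canon]
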